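-- pv_equiv track=rewrite | github.com/cheonyeji/algorithm_study | 이코테/이진탐색/q30_가사검색2.py | find_keyword_EndQuestionmark
-- ===== SOURCE A (Python) =====
-- def first_keyword(array, target, start, end):
--     target_textLen = len(target)
--     if start > end:
--         return None
--     mid = (start + end) // 2
--     # 특정 문자열을 포함하는 가장 첫번째 인덱스 찾기
--     if (
--         mid == 0 or array[mid - 1][0:target_textLen] != target[0:target_textLen]
--     ) and array[mid][0:target_textLen] == target[0:target_textLen]:
--         return mid
--     elif array[mid][0:target_textLen] >= target[0:target_textLen]:  # 왼쪽에서 문자열 찾기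
--         return first_keyword(array, target, start, mid - 1)
--     else:
--         return first_keyword(array, target, mid + 1, end)
--
-- def last_keyword(array, target, start, end):
--     target_textLen = len(target)
--     if start > end:
--         return None
--     mid = (start + end) // 2
--     # 특정 문자열을 포함하는 가장 마지막 인덱스 찾기
--     if (
--         mid == len(array) - 1
--         or array[mid + 1][0:target_textLen] != target[0:target_textLen]
--     ) and array[mid][0:target_textLen] == target[0:target_textLen]:
--         return mid
--     elif array[mid][0:target_textLen] > target[0:target_textLen]:
--         return last_keyword(array, target, start, mid - 1)
--     else:
--         return last_keyword(array, target, mid + 1, end)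
--
-- def find_keyword_EndQuestionmark(array, target):
--     # ?가 접미사로 붙는 경우
--     n = len(array)
--     target_notQuestionmark = ""
--     for i in target:
--         if i != "?":
--             target_notQuestionmark += i
--
--     first_idx = first_keyword(array, target_notQuestionmark, 0, n - 1)
--
--     if first_idx == None:
--         return 0  # 매치되는 단어 0
--
--     last_idx = last_keyword(array, target_notQuestionmark, 0, n - 1)
--
--     count = 0
--     for i in range(first_idx, last_idx + 1):
--         if len(array[i]) == len(target):
--             count += 1
--
--     return count
-- ===== SOURCE B (Python) =====
-- def find_keyword_EndQuestionmark(array, target):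
--     # B: no binary search -- strip '?' to get the prefix, then one linear pass.
--     prefix = "".join(c for c in target if c != "?")
--     L = len(prefix)
--     n = len(target)
--     count = 0
--     for w in array:
--         if len(w) == n and w[0:L] == prefix:
--             count += 1
--     return count
-- ===== Notes on version B (the rewrite author's own statement) =====
-- stated objective: simpler
-- what changed: Replaced the recursive first/last binary searches plus index-range length count by a single linear pass counting words whose L-char slice equals the '?'-stripped prefix and whose length equals len(target); equal to A whenever the array is sorted on its first L characters or no word starts with the prefix (Pre_), i.e. whenever the binary search's contract holds.
-- outside the precondition, e.g. on find_keyword_EndQuestionmark(['b', 'aa'], 'a?'): A returns 0, B returns 1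
import Mathlib
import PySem

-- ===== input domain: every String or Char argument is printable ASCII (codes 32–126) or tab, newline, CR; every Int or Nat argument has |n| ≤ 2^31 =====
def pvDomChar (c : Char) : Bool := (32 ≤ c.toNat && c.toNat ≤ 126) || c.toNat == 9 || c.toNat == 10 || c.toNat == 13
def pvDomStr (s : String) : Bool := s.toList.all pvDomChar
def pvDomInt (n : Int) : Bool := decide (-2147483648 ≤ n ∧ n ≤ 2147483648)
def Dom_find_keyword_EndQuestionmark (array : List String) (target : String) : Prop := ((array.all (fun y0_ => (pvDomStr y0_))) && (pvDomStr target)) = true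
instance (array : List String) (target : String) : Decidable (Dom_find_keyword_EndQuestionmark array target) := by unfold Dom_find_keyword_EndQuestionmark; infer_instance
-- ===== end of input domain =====

-- B replaces A's two recursive binary searches + index-range count by ONE linear pass
-- counting words whose L-char slice equals the '?'-stripped prefix and whose length
-- equals len(target); equal to A on sorted arrays (the binary search's contract, Pre_).

-- ===== PORT A =====
-- helper: first_keyword (target strings are carried as their char lists)
def first_keyword (array : List String) (target : List Char) (start fin : Int) : Option Int :=
  let target_textLen : Int := (target.length : Int)
  if _h : start > fin then none
  else
    let mid := PySem.Int.floordiv (start + fin) 2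
    -- array[mid] / array[mid-1] are always in range on the calls Python makes; pyGetD is exact there
    if ((mid == 0) ||
        decide (PySem.List.slice (PySem.List.pyGetD array (mid - 1) "").toList (some 0) (some target_textLen)
                ≠ PySem.List.slice target (some 0) (some target_textLen)))
       && decide (PySem.List.slice (PySem.List.pyGetD array mid "").toList (some 0) (some target_textLen)
                = PySem.List.slice target (some 0) (some target_textLen)) then
      some mid
    else if decide (PySem.List.slice (PySem.List.pyGetD array mid "").toList (some 0) (some target_textLen)
                ≥ PySem.List.slice target (some 0) (some target_textLen)) then
      first_keyword array target start (mid - 1)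
    else
      first_keyword array target (mid + 1) fin
termination_by (fin + 1 - start).toNat
decreasing_by
  · have hb := PySem.Int.floordiv_two_mid_bounds (lo := start) (hi := fin) (by omega)
    omega
  · have hb := PySem.Int.floordiv_two_mid_bounds (lo := start) (hi := fin) (by omega)
    omega

-- helper: last_keyword
def last_keyword (array : List String) (target : List Char) (start fin : Int) : Option Int :=
  let target_textLen : Int := (target.length : Int)
  if _h : start > fin then none
  else
    let mid := PySem.Int.floordiv (start + fin) 2
    if ((mid == (array.length : Int) - 1) ||
        decide (PySem.List.slice (PySem.List.pyGetD array (mid + 1) "").toList (some 0) (some target_textLen)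
                ≠ PySem.List.slice target (some 0) (some target_textLen)))
       && decide (PySem.List.slice (PySem.List.pyGetD array mid "").toList (some 0) (some target_textLen)
                = PySem.List.slice target (some 0) (some target_textLen)) then
      some mid
    else if decide (PySem.List.slice (PySem.List.pyGetD array mid "").toList (some 0) (some target_textLen)
                > PySem.List.slice target (some 0) (some target_textLen)) then
      last_keyword array target start (mid - 1)
    else
      last_keyword array target (mid + 1) fin
termination_by (fin + 1 - start).toNat
decreasing_by
  · have hb := PySem.Int.floordiv_two_mid_bounds (lo := start) (hi := fin) (by omega)
    omega
  · have hb := PySem.Int.floordiv_two_mid_bounds (lo := start) (hi := fin) (by omega)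
    omega

def find_keyword_EndQuestionmark (array : List String) (target : String) : Int :=
  let n : Int := (array.length : Int)
  let target_notQuestionmark : List Char :=
    target.toList.foldl (fun acc i => if i ≠ '?' then acc ++ [i] else acc) []
  match first_keyword array target_notQuestionmark 0 (n - 1) with
  | none => 0
  | some first_idx =>
      match last_keyword array target_notQuestionmark 0 (n - 1) with
      | none => 0  -- unreachable on sorted input (Python's `last_idx + 1` would raise on None there)
      | some last_idx =>
          (PySem.List.pyRange first_idx (last_idx + 1) 1).foldl
            (fun count i =>
              if (PySem.List.pyGetD array i "").toList.length == target.toList.length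
              then count + 1 else count) (0 : Int)

-- ===== PORT B =====
def find_keyword_EndQuestionmark_alt (array : List String) (target : String) : Int :=
  let pref : List Char := target.toList.filter (fun c => c ≠ '?')
  let L : Int := (pref.length : Int)
  let n : Nat := target.toList.length
  array.foldl (fun count w =>
    if w.toList.length == n && (PySem.List.slice w.toList (some 0) (some L) == pref)
    then count + 1 else count) (0 : Int)

-- ===== PRECONDITION & SPEC =====
-- Pre_ excludes arrays that are unsorted on the first L characters (L = length of the
-- '?'-stripped prefix of target) while containing a word starting with that prefix:
-- there A's binary search is outside its contract and returns an arbitrary count.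
def Pre_find_keyword_EndQuestionmark (array : List String) (target : String) : Prop :=
  List.Pairwise (fun a b =>
      a.toList.take (target.toList.filter (fun c => c ≠ '?')).length
        ≤ b.toList.take (target.toList.filter (fun c => c ≠ '?')).length) array
  ∨ (∀ w ∈ array, ¬ ((target.toList.filter (fun c => c ≠ '?')) <+: w.toList))
instance (array : List String) (target : String) : Decidable (Pre_find_keyword_EndQuestionmark array target) := by unfold Pre_find_keyword_EndQuestionmark; infer_instance

def pvWitness_find_keyword_EndQuestionmark : List String × String := (["ab", "abc", "b"], "a?")

def Spec_find_keyword_EndQuestionmark (array : List String) (target : String) (out : Int) : Prop := out = find_keyword_EndQuestionmark_alt array target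
instance (array : List String) (target : String) (out : Int) : Decidable (Spec_find_keyword_EndQuestionmark array target out) := by unfold Spec_find_keyword_EndQuestionmark; infer_instance

-- ===== CLAIM (what is proved, stated in full; the proofs are below) =====
def Claim_equal_find_keyword_EndQuestionmark : Prop := ∀ (array : List String) (target : String), Dom_find_keyword_EndQuestionmark array target → Pre_find_keyword_EndQuestionmark array target → Spec_find_keyword_EndQuestionmark array target (find_keyword_EndQuestionmark array target)

-- ===== LEMMAS AND PROOFS =====

-- the truncated word at index i (what A's slices compare)
def pvQ (array : List String) (p : List Char) (i : Nat) : List Char :=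
  (array.getD i "").toList.take p.length

theorem pvQ_mono (array : List String) (p : List Char)
    (hs : List.Pairwise (fun a b => a.toList.take p.length ≤ b.toList.take p.length) array) {i j : Nat} (hij : i ≤ j) (hj : j < array.length) :
    pvQ array p i ≤ pvQ array p j := by
  rcases Nat.lt_or_ge i j with hlt | hge
  · have hij' := (List.pairwise_iff_getElem.mp hs) i j (lt_trans hlt hj) hj hlt
    unfold pvQ
    rw [List.getD_eq_getElem array "" (lt_trans hlt hj), List.getD_eq_getElem array "" hj]
    exact hij' 
  · have : i = j := le_antisymm hij hge
    subst this
    exact le_rfl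

-- i ≤ j ≤ k and matches at i and k force a match at j
theorem pvQ_sandwich (array : List String) (p : List Char)
    (hs : List.Pairwise (fun a b => a.toList.take p.length ≤ b.toList.take p.length) array) {i j k : Nat} (h1 : i ≤ j) (h2 : j ≤ k)
    (hk : k < array.length) (hi : pvQ array p i = p) (hkk : pvQ array p k = p) :
    pvQ array p j = p := by
  have hj : j < array.length := lt_of_le_of_lt h2 hk
  have l1 : pvQ array p i ≤ pvQ array p j := pvQ_mono array p hs h1 hj
  have l2 : pvQ array p j ≤ pvQ array p k := pvQ_mono array p hs h2 hk
  rw [hi] at l1; rw [hkk] at l2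
  exact le_antisymm l2 l1


theorem pvSlice_take (w : List Char) (L : Nat) :
    PySem.List.slice w (some (0 : Int)) (some (L : Int)) = w.take L := by
  simp [PySem.List.slice_to_natCast]

theorem pvGet_q (array : List String) (p : List Char) {i : Int} (h0 : 0 ≤ i)
    (hN : i < (array.length : Int)) :
    PySem.List.slice (PySem.List.pyGetD array i "").toList (some 0) (some ((p.length : Nat) : Int))
      = pvQ array p i.toNat := by
  rw [PySem.List.pyGetD_eq_getElem array "" h0 hN, pvSlice_take]
  unfold pvQ
  rw [List.getD_eq_getElem array "" (by omega)]

-- every index i<N with pvQ = p yields a least match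
theorem pvLeast_exists (array : List String) (p : List Char) {i : Nat}
    (hi : i < array.length) (hp : pvQ array p i = p) :
    ∃ F : Nat, F < array.length ∧ pvQ array p F = p ∧ ∀ j : Nat, j < F → pvQ array p j ≠ p := by
  have hex : ∃ n : Nat, n < array.length ∧ pvQ array p n = p := ⟨i, hi, hp⟩
  classical
  refine ⟨Nat.find hex, (Nat.find_spec hex).1, (Nat.find_spec hex).2, ?_⟩
  intro j hj hpj
  have hFN := (Nat.find_spec hex).1
  exact Nat.find_min hex hj ⟨by omega, hpj⟩

-- every match yields a greatest match
theorem pvGreatest_exists (array : List String) (p : List Char) {i : Nat}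
    (hi : i < array.length) (hp : pvQ array p i = p) :
    ∃ G : Nat, G < array.length ∧ pvQ array p G = p ∧
      ∀ j : Nat, G < j → j < array.length → pvQ array p j ≠ p := by
  classical
  set P : Nat → Prop := fun j => pvQ array p j = p with hP
  have hle : i ≤ array.length - 1 := by omega
  have hspec : P (Nat.findGreatest P (array.length - 1)) :=
    Nat.findGreatest_spec hle hp
  refine ⟨Nat.findGreatest P (array.length - 1), ?_, hspec, ?_⟩
  · have := Nat.findGreatest_le (P := P) (array.length - 1)
    omega
  · intro j hj1 hj2 hpj
    exact Nat.findGreatest_is_greatest hj1 (by omega) hpj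

theorem pvFirst_correct_aux (array : List String) (p : List Char)
    (hs : List.Pairwise (fun a b => a.toList.take p.length ≤ b.toList.take p.length) array) :
    ∀ k : Nat, ∀ s e : Int, 0 ≤ s → e < (array.length : Int) →
    (∀ F : Nat, F < array.length → pvQ array p F = p →
        (∀ j : Nat, j < F → pvQ array p j ≠ p) → s ≤ (F : Int) ∧ (F : Int) ≤ e) →
    (e + 1 - s).toNat = k →
    (first_keyword array p s e = none ∧ ∀ i : Nat, i < array.length → pvQ array p i ≠ p) ∨
    (∃ m : Nat, first_keyword array p s e = some (m : Int) ∧ m < array.length ∧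
      pvQ array p m = p ∧ ∀ j : Nat, j < m → pvQ array p j ≠ p) := by
  intro k
  induction k using Nat.strong_induction_on with
  | _ k IH =>
  intro s e h0 he hinv hk
  by_cases hse : s > e
  · left
    constructor
    · rw [first_keyword]; simp only [dif_pos hse]
    · intro i hi hp
      obtain ⟨F, hF1, hF2, hF3⟩ := pvLeast_exists array p hi hp
      have := hinv F hF1 hF2 hF3
      omega
  · have hse' : s ≤ e := not_lt.mp hse
    have hmidb := PySem.Int.floordiv_two_mid_bounds (lo := s) (hi := e) hse'
    rw [first_keyword]
    simp only [dif_neg hse]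
    obtain ⟨hm1, hm2⟩ := hmidb
    set mid := PySem.Int.floordiv (s + e) 2 with hmd
    have hm0 : (0 : Int) ≤ mid := le_trans h0 hm1
    have hmN : mid < (array.length : Int) := lt_of_le_of_lt hm2 he
    have hMN : mid.toNat < array.length := by omega
    have hMc : ((mid.toNat : Nat) : Int) = mid := by omega
    have htgt' : PySem.List.slice p (some 0) (some ((p.length : Nat) : Int)) = p := by
      rw [pvSlice_take, List.take_length]
    have hqm := pvGet_q array p hm0 hmN
    simp only [Bool.and_eq_true, Bool.or_eq_true, beq_iff_eq, decide_eq_true_eq, ne_eq,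
      hqm, htgt']
    by_cases hPm : pvQ array p mid.toNat = p
    · by_cases hmz : mid = 0
      · rw [if_pos ⟨Or.inl hmz, hPm⟩]
        right
        refine ⟨mid.toNat, by rw [hMc], hMN, hPm, ?_⟩
        intro j hj hpj
        omega
      · have hm1' : (0 : Int) ≤ mid - 1 := by omega
        have hqprev := pvGet_q array p hm1' (by omega : mid - 1 < (array.length : Int))
        have hMm1 : (mid - 1).toNat = mid.toNat - 1 := by omega
        rw [hMm1] at hqprev
        rw [hqprev]
        by_cases hprev : pvQ array p (mid.toNat - 1) = p
        · rw [if_neg (fun hC => (hC.1.resolve_left hmz) hprev)]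
          rw [if_pos (le_of_eq hPm.symm : pvQ array p mid.toNat ≥ p)]
          refine IH (mid - s).toNat (by omega) s (mid - 1) h0 (by omega) ?_ (by omega)
          intro F hF1 hF2 hF3
          have hold := hinv F hF1 hF2 hF3
          have hne : ¬ (mid.toNat - 1 < F) := fun h => hF3 (mid.toNat - 1) h hprev
          omega
        · rw [if_pos ⟨Or.inr hprev, hPm⟩]
          right
          refine ⟨mid.toNat, by rw [hMc], hMN, hPm, ?_⟩
          intro j hj hpj
          exact hprev (pvQ_sandwich array p hs (by omega : j ≤ mid.toNat - 1)
            (by omega : mid.toNat - 1 ≤ mid.toNat) hMN hpj hPm)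
    · rw [if_neg (fun hC => hPm hC.2)]
      by_cases hge : p ≤ pvQ array p mid.toNat
      · rw [if_pos (hge : pvQ array p mid.toNat ≥ p)]
        refine IH (mid - s).toNat (by omega) s (mid - 1) h0 (by omega) ?_ (by omega)
        intro F hF1 hF2 hF3
        have hold := hinv F hF1 hF2 hF3
        have hFM : F < mid.toNat := by
          by_contra hcon
          push Not at hcon
          have hmono := pvQ_mono array p hs hcon hF1
          rw [hF2] at hmono
          exact hPm (le_antisymm hmono hge)
        omega
      · rw [if_neg hge]
        refine IH (e - mid).toNat (by omega) (mid + 1) e (by omega) he ?_ (by omega)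
        intro F hF1 hF2 hF3
        have hold := hinv F hF1 hF2 hF3
        have hFM : mid.toNat < F := by
          by_contra hcon
          push Not at hcon
          have hmono := pvQ_mono array p hs hcon hMN
          rw [hF2] at hmono
          exact hge hmono
        omega

theorem pvFirst_correct (array : List String) (p : List Char)
    (hs : List.Pairwise (fun a b => a.toList.take p.length ≤ b.toList.take p.length) array) (s e : Int) (h0 : 0 ≤ s) (he : e < (array.length : Int))
    (hinv : ∀ F : Nat, F < array.length → pvQ array p F = p →
              (∀ j : Nat, j < F → pvQ array p j ≠ p) → s ≤ (F : Int) ∧ (F : Int) ≤ e) :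
    (first_keyword array p s e = none ∧ ∀ i : Nat, i < array.length → pvQ array p i ≠ p) ∨
    (∃ m : Nat, first_keyword array p s e = some (m : Int) ∧ m < array.length ∧
      pvQ array p m = p ∧ ∀ j : Nat, j < m → pvQ array p j ≠ p) := by
  exact pvFirst_correct_aux array p hs ((e + 1 - s).toNat) s e h0 he hinv rfl

-- when nothing matches the prefix, the search returns None on ANY array, sorted or not
theorem pvFirst_none_aux (array : List String) (p : List Char)
    (hno : ∀ i : Nat, i < array.length → pvQ array p i ≠ p) :
    ∀ k : Nat, ∀ s e : Int, 0 ≤ s → e < (array.length : Int) → (e + 1 - s).toNat = k →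
      first_keyword array p s e = none := by
  intro k
  induction k using Nat.strong_induction_on with
  | _ k IH =>
  intro s e h0 he hk
  rw [first_keyword]
  by_cases hse : s > e
  · simp only [dif_pos hse]
  · simp only [dif_neg hse]
    have hse' : s ≤ e := not_lt.mp hse
    obtain ⟨hm1, hm2⟩ := PySem.Int.floordiv_two_mid_bounds (lo := s) (hi := e) hse'
    set mid := PySem.Int.floordiv (s + e) 2 with hmd
    have hm0 : (0 : Int) ≤ mid := le_trans h0 hm1
    have hmN : mid < (array.length : Int) := lt_of_le_of_lt hm2 he
    have hMN : mid.toNat < array.length := by omega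
    have htgt' : PySem.List.slice p (some 0) (some ((p.length : Nat) : Int)) = p := by
      rw [pvSlice_take, List.take_length]
    have hqm := pvGet_q array p hm0 hmN
    simp only [Bool.and_eq_true, Bool.or_eq_true, beq_iff_eq, decide_eq_true_eq, ne_eq,
      hqm, htgt']
    rw [if_neg (fun hC => hno mid.toNat hMN hC.2)]
    split_ifs with h
    · exact IH (mid - s).toNat (by omega) s (mid - 1) h0 (by omega) (by omega)
    · exact IH (e - mid).toNat (by omega) (mid + 1) e (by omega) he (by omega)

theorem pvLast_correct_aux (array : List String) (p : List Char)
    (hs : List.Pairwise (fun a b => a.toList.take p.length ≤ b.toList.take p.length) array) :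
    ∀ k : Nat, ∀ s e : Int, 0 ≤ s → e < (array.length : Int) →
    (∀ G : Nat, G < array.length → pvQ array p G = p →
        (∀ j : Nat, G < j → j < array.length → pvQ array p j ≠ p) → s ≤ (G : Int) ∧ (G : Int) ≤ e) →
    (e + 1 - s).toNat = k →
    (last_keyword array p s e = none ∧ ∀ i : Nat, i < array.length → pvQ array p i ≠ p) ∨
    (∃ m : Nat, last_keyword array p s e = some (m : Int) ∧ m < array.length ∧
      pvQ array p m = p ∧ ∀ j : Nat, m < j → j < array.length → pvQ array p j ≠ p) := by
  intro k
  induction k using Nat.strong_induction_on with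
  | _ k IH =>
  intro s e h0 he hinv hk
  by_cases hse : s > e
  · left
    constructor
    · rw [last_keyword]; simp only [dif_pos hse]
    · intro i hi hp
      obtain ⟨G, hG1, hG2, hG3⟩ := pvGreatest_exists array p hi hp
      have := hinv G hG1 hG2 hG3
      omega
  · have hse' : s ≤ e := not_lt.mp hse
    have hmidb := PySem.Int.floordiv_two_mid_bounds (lo := s) (hi := e) hse'
    rw [last_keyword]
    simp only [dif_neg hse]
    obtain ⟨hm1, hm2⟩ := hmidb
    set mid := PySem.Int.floordiv (s + e) 2 with hmd
    have hm0 : (0 : Int) ≤ mid := le_trans h0 hm1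
    have hmN : mid < (array.length : Int) := lt_of_le_of_lt hm2 he
    have hMN : mid.toNat < array.length := by omega
    have hMc : ((mid.toNat : Nat) : Int) = mid := by omega
    have htgt' : PySem.List.slice p (some 0) (some ((p.length : Nat) : Int)) = p := by
      rw [pvSlice_take, List.take_length]
    have hqm := pvGet_q array p hm0 hmN
    simp only [Bool.and_eq_true, Bool.or_eq_true, beq_iff_eq, decide_eq_true_eq, ne_eq,
      hqm, htgt']
    by_cases hPm : pvQ array p mid.toNat = p
    · by_cases hmz : mid = (array.length : Int) - 1
      · rw [if_pos ⟨Or.inl hmz, hPm⟩]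
        right
        refine ⟨mid.toNat, by rw [hMc], hMN, hPm, ?_⟩
        intro j hj1 hj2 hpj
        omega
      · have hnext0 : (0 : Int) ≤ mid + 1 := by omega
        have hqnext := pvGet_q array p hnext0 (by omega : mid + 1 < (array.length : Int))
        have hMp1 : (mid + 1).toNat = mid.toNat + 1 := by omega
        rw [hMp1] at hqnext
        rw [hqnext]
        by_cases hnext : pvQ array p (mid.toNat + 1) = p
        · rw [if_neg (fun hC => (hC.1.resolve_left hmz) hnext)]
          rw [if_neg (fun h => absurd h (by rw [hPm]; exact lt_irrefl p))]
          refine IH (e - mid).toNat (by omega) (mid + 1) e (by omega) he ?_ (by omega)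
          intro G hG1 hG2 hG3
          have hold := hinv G hG1 hG2 hG3
          have hne : ¬ (G < mid.toNat + 1) := fun h => hG3 (mid.toNat + 1) h (by omega) hnext
          omega
        · rw [if_pos ⟨Or.inr hnext, hPm⟩]
          right
          refine ⟨mid.toNat, by rw [hMc], hMN, hPm, ?_⟩
          intro j hj1 hj2 hpj
          exact hnext (pvQ_sandwich array p hs (by omega : mid.toNat ≤ mid.toNat + 1)
            (by omega : mid.toNat + 1 ≤ j) hj2 hPm hpj)
    · rw [if_neg (fun hC => hPm hC.2)]
      by_cases hgt : p < pvQ array p mid.toNat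
      · rw [if_pos hgt]
        refine IH (mid - s).toNat (by omega) s (mid - 1) h0 (by omega) ?_ (by omega)
        intro G hG1 hG2 hG3
        have hold := hinv G hG1 hG2 hG3
        have hGM : G < mid.toNat := by
          by_contra hcon
          push Not at hcon
          have hmono := pvQ_mono array p hs hcon hG1
          rw [hG2] at hmono
          exact absurd (lt_of_lt_of_le hgt hmono) (lt_irrefl p)
        omega
      · rw [if_neg hgt]
        refine IH (e - mid).toNat (by omega) (mid + 1) e (by omega) he ?_ (by omega)
        intro G hG1 hG2 hG3
        have hold := hinv G hG1 hG2 hG3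
        have hGM : mid.toNat < G := by
          by_contra hcon
          push Not at hcon
          have hmono := pvQ_mono array p hs hcon hMN
          rw [hG2] at hmono
          exact hPm (le_antisymm (not_lt.mp hgt) hmono)
        omega

theorem pvLast_correct (array : List String) (p : List Char)
    (hs : List.Pairwise (fun a b => a.toList.take p.length ≤ b.toList.take p.length) array) (s e : Int) (h0 : 0 ≤ s) (he : e < (array.length : Int))
    (hinv : ∀ G : Nat, G < array.length → pvQ array p G = p →
              (∀ j : Nat, G < j → j < array.length → pvQ array p j ≠ p) → s ≤ (G : Int) ∧ (G : Int) ≤ e) :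
    (last_keyword array p s e = none ∧ ∀ i : Nat, i < array.length → pvQ array p i ≠ p) ∨
    (∃ m : Nat, last_keyword array p s e = some (m : Int) ∧ m < array.length ∧
      pvQ array p m = p ∧ ∀ j : Nat, m < j → j < array.length → pvQ array p j ≠ p) := by
  exact pvLast_correct_aux array p hs ((e + 1 - s).toNat) s e h0 he hinv rfl

-- map over getD of range rebuilds the list
theorem pvMap_getD_range (l : List String) :
    (List.range l.length).map (fun i => l.getD i "") = l := by
  apply List.ext_getElem
  · simp
  · intro i h1 h2
    simp [List.getElem?_eq_getElem h2]

-- counting over the whole range with an interval indicator = counting over the interval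
theorem pvCount_interval (N F G : Nat) (d1 d2 : Nat → Bool) (hFG : F ≤ G) (hGN : G < N)
    (h1 : ∀ i, i < N → (d1 i = true ↔ (F ≤ i ∧ i ≤ G))) :
    (List.range N).countP (fun i => d2 i && d1 i)
      = (List.range (G + 1 - F)).countP (fun k => d2 (F + k)) := by
  rw [← List.countP_filter]
  have h2 : List.range' 0 F ++ List.range' F (G + 1 - F) = List.range' 0 (G + 1) := by
    have h := List.range'_append (s := 0) (m := F) (n := G + 1 - F) (step := 1)
    rw [(by omega : F + (G + 1 - F) = G + 1)] at h
    simpa using h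
  have h3 : List.range' 0 (G + 1) ++ List.range' (G + 1) (N - (G + 1)) = List.range' 0 N := by
    have h := List.range'_append (s := 0) (m := G + 1) (n := N - (G + 1)) (step := 1)
    rw [(by omega : (G + 1) + (N - (G + 1)) = N)] at h
    simpa using h
  have hfil : (List.range N).filter d1 = List.range' F (G + 1 - F) := by
    rw [List.range_eq_range', ← h3, ← h2, List.filter_append, List.filter_append]
    have f1 : (List.range' 0 F).filter d1 = [] := by
      apply List.filter_eq_nil_iff.mpr
      intro a ha
      have hb := List.mem_range'_1.mp ha
      have := h1 a (by omega)
      simp only [ne_eq]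
      intro hcon
      have := this.mp hcon
      omega
    have f2 : (List.range' F (G + 1 - F)).filter d1 = List.range' F (G + 1 - F) := by
      apply List.filter_eq_self.mpr
      intro a ha
      have hb := List.mem_range'_1.mp ha
      exact (h1 a (by omega)).mpr (by omega)
    have f3 : (List.range' (G + 1) (N - (G + 1))).filter d1 = [] := by
      apply List.filter_eq_nil_iff.mpr
      intro a ha
      have hb := List.mem_range'_1.mp ha
      have := h1 a (by omega)
      simp only [ne_eq]
      intro hcon
      have := this.mp hcon
      omega
    rw [f1, f2, f3]
    simp
  rw [hfil, List.range'_eq_map_range, List.countP_map]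
  rfl

-- ===== VERDICT (by name: the statement is the Claim_ definition above) =====
theorem find_keyword_EndQuestionmark_spec : Claim_equal_find_keyword_EndQuestionmark := by
  unfold Claim_equal_find_keyword_EndQuestionmark
  intro array target _hdom hpre
  unfold Pre_find_keyword_EndQuestionmark at hpre
  unfold Spec_find_keyword_EndQuestionmark
  simp only [find_keyword_EndQuestionmark, find_keyword_EndQuestionmark_alt]
  have hbuild : target.toList.foldl (fun acc i => if i ≠ '?' then acc ++ [i] else acc) ([] : List Char)
      = target.toList.filter (fun c => c ≠ '?') := by
    have h := PySem.List.foldl_append_if (fun c => decide (c ≠ '?')) id target.toList []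
    simpa using h
  rw [hbuild]
  set p : List Char := target.toList.filter (fun c => c ≠ '?') with hp
  have hN1 : ((array.length : Int) - 1) < (array.length : Int) := by omega
  rcases hpre with hsort | hnomatch
  case _ =>
    rcases pvFirst_correct array p hsort 0 ((array.length : Int) - 1) le_rfl hN1
        (fun F hF1 _ _ => ⟨by omega, by omega⟩) with ⟨hfeq, hno⟩ | ⟨F, hFeq, hFN, hFp, hFmin⟩
    · simp only [hfeq]
      rw [PySem.List.foldl_count_if]
      have hcz : array.countP (fun w =>
          w.toList.length == target.toList.length &&
            (PySem.List.slice w.toList (some 0) (some ((p.length : Nat) : Int)) == p)) = 0 := by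
        apply List.countP_eq_zero.mpr
        intro w hw
        obtain ⟨i, hi, heq⟩ := List.mem_iff_getElem.mp hw
        subst heq
        simp only [Bool.and_eq_true, beq_iff_eq, pvSlice_take]
        rintro ⟨-, hsl⟩
        apply hno i hi
        unfold pvQ
        rw [List.getD_eq_getElem array "" hi]
        exact hsl
      rw [hcz]
      simp
    · rcases pvLast_correct array p hsort 0 ((array.length : Int) - 1) le_rfl hN1
          (fun G hG1 _ _ => ⟨by omega, by omega⟩) with ⟨hleq, hno⟩ | ⟨G, hGeq, hGN, hGp, hGmax⟩
      · exact absurd hFp (hno F hFN)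
      · simp only [hFeq, hGeq]
        have hFG : F ≤ G := by
          by_contra hcon
          push Not at hcon
          exact hGmax F hcon hFN hFp
        rw [PySem.List.foldl_count_if, PySem.List.foldl_count_if]
        simp only [zero_add, Nat.cast_inj]
        rw [PySem.List.pyRange_one]
        rw [(by omega : ((G : Int) + 1 - (F : Int)).toNat = G + 1 - F)]
        rw [List.countP_map]
        conv_rhs => rw [← pvMap_getD_range array, List.countP_map]
        have hL : (List.range (G + 1 - F)).countP
              ((fun i => (PySem.List.pyGetD array i "").toList.length == target.toList.length) ∘
                (fun k : Nat => ((F : Int) + (k : Int))))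
            = (List.range (G + 1 - F)).countP
                (fun k => (array.getD (F + k) "").toList.length == target.toList.length) := by
          apply List.countP_congr
          intro k hk
          have hk' : k < G + 1 - F := List.mem_range.mp hk
          have h0' : (0 : Int) ≤ (F : Int) + (k : Int) := by omega
          have hlt : (F : Int) + (k : Int) < (array.length : Int) := by omega
          simp only [Function.comp]
          rw [PySem.List.pyGetD_eq_getElem array "" h0' hlt]
          rw [List.getD_eq_getElem array "" (by omega : F + k < array.length)]
          have hnt : ((F : Int) + (k : Int)).toNat = F + k := by omega
          simp only [hnt]
        have hR : (List.range array.length).countP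
              ((fun w =>
                  w.toList.length == target.toList.length &&
                    (PySem.List.slice w.toList (some 0) (some ((p.length : Nat) : Int)) == p)) ∘
                (fun i => array.getD i ""))
            = (List.range array.length).countP
                (fun i => ((array.getD i "").toList.length == target.toList.length) &&
                  decide (pvQ array p i = p)) := by
          apply List.countP_congr
          intro i hi
          simp only [Function.comp, pvSlice_take, Bool.and_eq_true, beq_iff_eq, decide_eq_true_eq]
          exact Iff.rfl
        rw [hL, hR]
        have hchar : ∀ i, i < array.length →
            ((decide (pvQ array p i = p)) = true ↔ (F ≤ i ∧ i ≤ G)) := by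
          intro i hiN
          simp only [decide_eq_true_eq]
          constructor
          · intro hm
            constructor
            · by_contra hcon
              push Not at hcon
              exact hFmin i hcon hm
            · by_contra hcon
              push Not at hcon
              exact hGmax i hcon hiN hm
          · intro ⟨hFi, hiG⟩
            exact pvQ_sandwich array p hsort hFi hiG hGN hFp hGp
        exact (pvCount_interval array.length F G (fun i => decide (pvQ array p i = p))
          (fun i => (array.getD i "").toList.length == target.toList.length) hFG hGN hchar).symm

  case _ =>
    have hno : ∀ i : Nat, i < array.length → pvQ array p i ≠ p := by
      intro i hi hq
      apply hnomatch (array[i]'hi) (array.getElem_mem hi)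
      have htk : (array[i]'hi).toList.take p.length = p := by
        unfold pvQ at hq
        rwa [List.getD_eq_getElem array "" hi] at hq
      rw [← htk]
      exact List.take_prefix _ _
    have hfeq := pvFirst_none_aux array p hno (((array.length : Int) - 1 + 1 - 0).toNat)
      0 ((array.length : Int) - 1) le_rfl hN1 rfl
    simp only [hfeq]
    rw [PySem.List.foldl_count_if]
    have hcz : array.countP (fun w =>
        w.toList.length == target.toList.length &&
          (PySem.List.slice w.toList (some 0) (some ((p.length : Nat) : Int)) == p)) = 0 := by
      apply List.countP_eq_zero.mpr
      intro w hw
      obtain ⟨i, hi, heq⟩ := List.mem_iff_getElem.mp hw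
      subst heq
      simp only [Bool.and_eq_true, beq_iff_eq, pvSlice_take]
      rintro ⟨-, hsl⟩
      apply hno i hi
      unfold pvQ
      rw [List.getD_eq_getElem array "" hi]
      exact hsl
    rw [hcz]
    simp
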